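-- pv_equiv track=rewrite | github.com/ScottChangSQ/BTCXAU_Monitoring_and_Push_APK | scripts/check_windows_server_bundle.py | compare_file_hashes
-- ===== SOURCE A (Python) =====
-- def compare_file_hashes(expected: dict[str, str], actual: dict[str, str]) -> dict[str, list[str]]:
--     """比较期望部署包与当前部署目录的文件差异。"""
--     expected_paths = set(expected.keys())
--     actual_paths = set(actual.keys())
--     changed = sorted(path for path in expected_paths & actual_paths if expected[path] != actual[path])
--     missing = sorted(expected_paths - actual_paths)
--     extra = sorted(actual_paths - expected_paths)
--     return {
--         "changed": changed,
--         "missing": missing,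
--         "extra": extra,
--     }
-- ===== SOURCE B (Python) =====
-- def compare_file_hashes(expected: dict[str, str], actual: dict[str, str]) -> dict[str, list[str]]:
--     """Sort both item lists by path, then one two-pointer merge classifies
--     changed/missing/extra; outputs come out already sorted, no membership tests."""
--     ei = sorted(expected.items(), key=lambda kv: kv[0])
--     ai = sorted(actual.items(), key=lambda kv: kv[0])
--     changed, missing, extra = [], [], []
--     i = j = 0
--     while i < len(ei) and j < len(ai):
--         pe, he = ei[i]
--         pa, ha = ai[j]
--         if pe == pa:
--             if he != ha:
--                 changed.append(pe)
--             i += 1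
--             j += 1
--         elif pe < pa:
--             missing.append(pe)
--             i += 1
--         else:
--             extra.append(pa)
--             j += 1
--     missing.extend(p for p, _ in ei[i:])
--     extra.extend(p for p, _ in ai[j:])
--     return {"changed": changed, "missing": missing, "extra": extra}
-- ===== Notes on version B (the rewrite author's own statement) =====
-- stated objective: alternative
-- what changed: Replaces A's set-algebra (key-set intersection/differences with per-path dict lookups, then sorting each result) with a sort-then-merge algorithm: both item lists are sorted by path once and a single two-pointer merge classifies each path as changed/missing/extra, producing the three lists already in sorted order with no membership tests and no post-sort.
import Mathlib
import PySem

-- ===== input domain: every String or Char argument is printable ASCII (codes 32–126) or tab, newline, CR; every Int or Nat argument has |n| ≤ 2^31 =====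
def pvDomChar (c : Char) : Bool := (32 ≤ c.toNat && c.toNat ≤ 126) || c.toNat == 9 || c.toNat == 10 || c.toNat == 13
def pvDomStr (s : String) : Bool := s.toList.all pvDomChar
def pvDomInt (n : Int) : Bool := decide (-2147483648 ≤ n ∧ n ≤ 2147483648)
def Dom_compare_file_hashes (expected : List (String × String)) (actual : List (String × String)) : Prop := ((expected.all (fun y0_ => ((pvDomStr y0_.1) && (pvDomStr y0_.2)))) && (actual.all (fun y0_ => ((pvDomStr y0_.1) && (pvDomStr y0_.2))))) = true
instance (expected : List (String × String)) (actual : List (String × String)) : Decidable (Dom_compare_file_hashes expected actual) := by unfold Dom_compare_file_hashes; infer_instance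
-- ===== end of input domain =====

-- B replaces A's key-set intersection/differences and three sorts with sort-then-merge:
-- both item lists are sorted by path once and a single two-pointer merge classifies each
-- path as changed/missing/extra, already in order (objective: alternative algorithm).

-- ===== PORT A =====
-- expected[path] / actual[path] are only looked up for paths present in both dicts, so getD _ "" is exact there.
def compare_file_hashes (expected : List (String × String)) (actual : List (String × String)) : List (String × List String) :=
  let e := PySem.Dict.ofList expected
  let a := PySem.Dict.ofList actual
  let expected_paths : PySem.Set String := PySem.Set.ofList e.keys
  let actual_paths : PySem.Set String := PySem.Set.ofList a.keys
  let changed := PySem.List.sorted ((PySem.Set.inter expected_paths actual_paths).filter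
      (fun p => decide (e.getD p "" ≠ a.getD p ""))) (fun x => x) false
  let missing := PySem.List.sorted (PySem.Set.diff expected_paths actual_paths) (fun x => x) false
  let extra := PySem.List.sorted (PySem.Set.diff actual_paths expected_paths) (fun x => x) false
  [("changed", changed), ("missing", missing), ("extra", extra)]

-- ===== PORT B =====
-- Source B's while loop over indices i, j, ported as structural recursion on the two sorted
-- tails; the appends at the back of the Python lists become conses in front of the
-- recursive result, and the i/j-advance cases are the three branches.
def cfhMerge : List (String × String) → List (String × String) → List String × List String × List String
  | [], aj => ([], [], aj.map (·.1))
  | pv :: et, [] => ([], (pv :: et).map (·.1), [])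
  | (pe, he) :: et, (pa, ha) :: at' =>
    if pe == pa then
      let r := cfhMerge et at'
      ((if he ≠ ha then pe :: r.1 else r.1), r.2.1, r.2.2)
    else if pe < pa then
      let r := cfhMerge et ((pa, ha) :: at')
      (r.1, pe :: r.2.1, r.2.2)
    else
      let r := cfhMerge ((pe, he) :: et) at'
      (r.1, r.2.1, pa :: r.2.2)
termination_by ei ai => ei.length + ai.length


def compare_file_hashes_alt (expected : List (String × String)) (actual : List (String × String)) : List (String × List String) :=
  let e := PySem.Dict.ofList expected
  let a := PySem.Dict.ofList actual
  let ei := PySem.List.sorted e.items (fun kv => kv.1) false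
  let ai := PySem.List.sorted a.items (fun kv => kv.1) false
  let r := cfhMerge ei ai
  [("changed", r.1), ("missing", r.2.1), ("extra", r.2.2)]

-- ===== PRECONDITION & SPEC =====
def Spec_compare_file_hashes (expected : List (String × String)) (actual : List (String × String)) (out : List (String × List String)) : Prop := out = compare_file_hashes_alt expected actual
instance (expected : List (String × String)) (actual : List (String × String)) (out : List (String × List String)) : Decidable (Spec_compare_file_hashes expected actual out) := by unfold Spec_compare_file_hashes; infer_instance

-- ===== CLAIM (what is proved, stated in full; the proofs are below) =====
def Claim_equal_compare_file_hashes : Prop := ∀ (expected : List (String × String)) (actual : List (String × String)), Dom_compare_file_hashes expected actual → Spec_compare_file_hashes expected actual (compare_file_hashes expected actual)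

-- ===== LEMMAS AND PROOFS =====

lemma pairwise_lt_of_le_nodup {l : List String} (h1 : l.Pairwise (· ≤ ·)) (h2 : l.Nodup) :
    l.Pairwise (· < ·) :=
  (h1.and h2).imp (fun h => lt_of_le_of_ne h.1 h.2)

lemma getD_val_of_mem_keys (d : PySem.Dict String String) (p : String) (hp : p ∈ d.keys) :
    d.get? p = some (d.getD p "") := by
  cases hv : d.get? p with
  | none => exact absurd ((PySem.Dict.get?_eq_none_iff_not_mem_keys d p).mp hv) (by simp [hp])
  | some v => rw [PySem.Dict.getD_of_get?_eq_some d "" hv]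

-- sorted(xs) equals a strictly increasing ys when ys has the same members and both are nodup
lemma sorted_eq_of_nodup_mem_iff (xs ys : List String)
    (hx : xs.Nodup) (hy : ys.Pairwise (· < ·)) (h : ∀ p, p ∈ ys ↔ p ∈ xs) :
    PySem.List.sorted xs (fun x => x) false = ys :=
  PySem.List.sorted_eq_of_perm_of_pairwise_lt xs ys (fun x => x)
    ((List.perm_ext_iff_of_nodup (hy.imp ne_of_lt) hx).mpr h) hy

lemma cfhMerge_eq (ei ai : List (String × String))
    (hei : (ei.map (·.1)).Pairwise (· < ·)) (hai : (ai.map (·.1)).Pairwise (· < ·)) :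
    cfhMerge ei ai =
      ((ei.filter (fun pv => decide (pv.1 ∈ ai.map (·.1) ∧ pv ∉ ai))).map (·.1),
       (ei.filter (fun pv => decide (pv.1 ∉ ai.map (·.1)))).map (·.1),
       (ai.filter (fun qv => decide (qv.1 ∉ ei.map (·.1)))).map (·.1)) := by
  induction ei, ai using cfhMerge.induct with
  | case1 aj => simp [cfhMerge]
  | case2 pv et => simp [cfhMerge]
  | case3 pe he et pa ha at' heq ih =>
    have hpe : pe = pa := by simpa using heq
    subst hpe
    rw [List.map_cons, List.pairwise_cons] at hei hai
    obtain ⟨hE, hei'⟩ := hei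
    obtain ⟨hA, hai'⟩ := hai
    have hE' : ∀ qv ∈ et, pe < qv.1 := fun qv hq => hE _ (List.mem_map_of_mem hq)
    have hA' : ∀ qv ∈ at', pe < qv.1 := fun qv hq => hA _ (List.mem_map_of_mem hq)
    have hno : (pe, he) ∉ at' := fun h => lt_irrefl pe (hA' _ h)
    have h1 : List.filter (fun pv => decide (pv.1 ∈ List.map (fun x => x.1) ((pe, ha) :: at') ∧ pv ∉ (pe, ha) :: at')) et
        = List.filter (fun pv => decide (pv.1 ∈ List.map (fun x => x.1) at' ∧ pv ∉ at')) et := by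
      apply List.filter_congr; intro pv hp
      have hne : pv.1 ≠ pe := (hE' pv hp).ne'
      rw [decide_eq_decide]
      simp [List.mem_cons, Prod.ext_iff, hne]
    have h2 : List.filter (fun pv => decide (pv.1 ∉ List.map (fun x => x.1) ((pe, ha) :: at'))) et
        = List.filter (fun pv => decide (pv.1 ∉ List.map (fun x => x.1) at')) et := by
      apply List.filter_congr; intro pv hp
      have hne : pv.1 ≠ pe := (hE' pv hp).ne'
      rw [decide_eq_decide]
      simp [List.mem_cons, hne]
    have h3 : List.filter (fun qv => decide (qv.1 ∉ List.map (fun x => x.1) ((pe, he) :: et))) at'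
        = List.filter (fun qv => decide (qv.1 ∉ List.map (fun x => x.1) et)) at' := by
      apply List.filter_congr; intro qv hq
      have hne : qv.1 ≠ pe := (hA' qv hq).ne'
      rw [decide_eq_decide]
      simp [List.mem_cons, hne]
    have hdecC : decide ((pe, he).1 ∈ List.map (fun x => x.1) ((pe, ha) :: at') ∧ (pe, he) ∉ (pe, ha) :: at')
        = decide (he ≠ ha) := by
      rw [decide_eq_decide]
      simp [List.mem_cons, Prod.ext_iff, hno]
    have hdecM : decide ((pe, he).1 ∉ List.map (fun x => x.1) ((pe, ha) :: at')) = false := by simp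
    have hdecX : decide ((pe, ha).1 ∉ List.map (fun x => x.1) ((pe, he) :: et)) = false := by simp
    rw [cfhMerge]
    simp only [beq_self_eq_true, if_true, List.filter_cons, hdecC, hdecM, hdecX,
      Bool.false_eq_true, if_false, h1, h2, h3, ih hei' hai']
    by_cases hv : he = ha <;> simp [hv]
  | case4 pe he et pa ha at' heq hlt ih =>
    have hne : pe ≠ pa := by simpa using heq
    have hlt' : pe < pa := by simpa using hlt
    rw [List.map_cons, List.pairwise_cons] at hei hai
    obtain ⟨hE, hei'⟩ := hei
    obtain ⟨hA, hai'⟩ := hai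
    have hA' : ∀ qv ∈ (pa, ha) :: at', pe < qv.1 := by
      intro qv hq
      rcases List.mem_cons.mp hq with h | h
      · rw [h]; exact hlt'
      · exact hlt'.trans (hA _ (List.mem_map_of_mem h))
    have hpeA : pe ∉ List.map (fun x => x.1) ((pa, ha) :: at') := by
      intro hmem
      obtain ⟨qv, hq, hq1⟩ := List.mem_map.mp hmem
      exact lt_irrefl pe (hq1 ▸ hA' qv hq)
    have h3 : List.filter (fun qv => decide (qv.1 ∉ List.map (fun x => x.1) ((pe, he) :: et))) ((pa, ha) :: at')
        = List.filter (fun qv => decide (qv.1 ∉ List.map (fun x => x.1) et)) ((pa, ha) :: at') := by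
      apply List.filter_congr; intro qv hq
      have hq1 : qv.1 ≠ pe := (hA' qv hq).ne'
      rw [decide_eq_decide]
      simp [List.mem_cons, hq1]
    have hdecC : decide ((pe, he).1 ∈ List.map (fun x => x.1) ((pa, ha) :: at') ∧ (pe, he) ∉ (pa, ha) :: at')
        = false := by
      simp only [decide_eq_false_iff_not]
      exact fun h => hpeA h.1
    have hdecM : decide ((pe, he).1 ∉ List.map (fun x => x.1) ((pa, ha) :: at')) = true := by
      simpa using hpeA
    rw [cfhMerge]
    rw [if_neg (by simpa using hne), if_pos (by exact hlt')]
    have hai2 : ((((pa, ha) :: at').map (fun x => x.1)).Pairwise (· < ·)) := by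
      rw [List.map_cons, List.pairwise_cons]; exact ⟨hA, hai'⟩
    simp only [List.filter_cons, hdecC, hdecM, Bool.false_eq_true, if_false, if_true,
      h3, ih hei' hai2]
    simp
  | case5 pe he et pa ha at' heq hlt ih =>
    have hne : pe ≠ pa := by simpa using heq
    have hgt : pa < pe := lt_of_le_of_ne (not_lt.mp (by simpa using hlt)) (Ne.symm hne)
    rw [List.map_cons, List.pairwise_cons] at hei hai
    obtain ⟨hE, hei'⟩ := hei
    obtain ⟨hA, hai'⟩ := hai
    have hE' : ∀ pv ∈ (pe, he) :: et, pa < pv.1 := by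
      intro pv hp
      rcases List.mem_cons.mp hp with h | h
      · rw [h]; exact hgt
      · exact hgt.trans (hE _ (List.mem_map_of_mem h))
    have hpaE : pa ∉ List.map (fun x => x.1) ((pe, he) :: et) := by
      intro hmem
      obtain ⟨pv, hp, hp1⟩ := List.mem_map.mp hmem
      exact lt_irrefl pa (hp1 ▸ hE' pv hp)
    have h1 : List.filter (fun pv => decide (pv.1 ∈ List.map (fun x => x.1) ((pa, ha) :: at') ∧ pv ∉ (pa, ha) :: at')) ((pe, he) :: et)
        = List.filter (fun pv => decide (pv.1 ∈ List.map (fun x => x.1) at' ∧ pv ∉ at')) ((pe, he) :: et) := by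
      apply List.filter_congr; intro pv hp
      have hp1 : pv.1 ≠ pa := (hE' pv hp).ne'
      rw [decide_eq_decide]
      simp [List.mem_cons, Prod.ext_iff, hp1]
    have h2 : List.filter (fun pv => decide (pv.1 ∉ List.map (fun x => x.1) ((pa, ha) :: at'))) ((pe, he) :: et)
        = List.filter (fun pv => decide (pv.1 ∉ List.map (fun x => x.1) at')) ((pe, he) :: et) := by
      apply List.filter_congr; intro pv hp
      have hp1 : pv.1 ≠ pa := (hE' pv hp).ne'
      rw [decide_eq_decide]
      simp [List.mem_cons, hp1]
    have hdecX : decide ((pa, ha).1 ∉ List.map (fun x => x.1) ((pe, he) :: et)) = true := by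
      simpa using hpaE
    rw [cfhMerge]
    rw [if_neg (by simpa using hne), if_neg (by exact not_lt.mpr hgt.le)]
    have hei2 : ((((pe, he) :: et).map (fun x => x.1)).Pairwise (· < ·)) := by
      rw [List.map_cons, List.pairwise_cons]; exact ⟨hE, hei'⟩
    simp only [List.filter_cons, hdecX, if_true, h1, h2, ih hei2 hai']
    simp

-- ===== VERDICT (by name: the statement is the Claim_ definition above) =====
theorem compare_file_hashes_spec : Claim_equal_compare_file_hashes := by
  intro expected actual _
  unfold Spec_compare_file_hashes compare_file_hashes compare_file_hashes_alt
  simp only []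
  set e := PySem.Dict.ofList expected with he
  set a := PySem.Dict.ofList actual with ha
  set ei := PySem.List.sorted e.items (fun kv => kv.1) false with hei
  set ai := PySem.List.sorted a.items (fun kv => kv.1) false with hai
  have hek : e.keys.Nodup := PySem.Dict.nodup_keys_ofList expected
  have hak : a.keys.Nodup := PySem.Dict.nodup_keys_ofList actual
  have hkeyE : e.items.map (fun x => x.1) = e.keys := rfl
  have hkeyA : a.items.map (fun x => x.1) = a.keys := rfl
  have heset : (PySem.Set.ofList e.keys : List String) = e.keys := PySem.Set.ofList_eq_self_of_nodup e.keys hek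
  have haset : (PySem.Set.ofList a.keys : List String) = a.keys := PySem.Set.ofList_eq_self_of_nodup a.keys hak
  have hpermE : ei.Perm e.items := PySem.List.sorted_perm e.items (fun kv => kv.1) false
  have hpermA : ai.Perm a.items := PySem.List.sorted_perm a.items (fun kv => kv.1) false
  have hmemE : ∀ pv : String × String, pv ∈ ei ↔ pv ∈ e.items := fun pv => hpermE.mem_iff
  have hmemA : ∀ pv : String × String, pv ∈ ai ↔ pv ∈ a.items := fun pv => hpermA.mem_iff
  -- keys of the sorted item lists
  have hkE : ∀ p : String, p ∈ ei.map (fun x => x.1) ↔ p ∈ e.keys := fun p => by rw [(hpermE.map (fun x => x.1)).mem_iff, hkeyE]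
  have hkA : ∀ p : String, p ∈ ai.map (fun x => x.1) ↔ p ∈ a.keys := fun p => by rw [(hpermA.map (fun x => x.1)).mem_iff, hkeyA]
  have hndE : (ei.map (fun x => x.1)).Nodup := ((hpermE.map (fun x => x.1)).nodup_iff).mpr (hkeyE ▸ hek)
  have hndA : (ai.map (fun x => x.1)).Nodup := ((hpermA.map (fun x => x.1)).nodup_iff).mpr (hkeyA ▸ hak)
  have hltE : (ei.map (fun x => x.1)).Pairwise (· < ·) :=
    pairwise_lt_of_le_nodup (PySem.List.sorted_map_key_pairwise e.items (fun kv => kv.1)) hndE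
  have hltA : (ai.map (fun x => x.1)).Pairwise (· < ·) :=
    pairwise_lt_of_le_nodup (PySem.List.sorted_map_key_pairwise a.items (fun kv => kv.1)) hndA
  rw [cfhMerge_eq ei ai hltE hltA]
  -- membership in each dict's items, via getD
  have hitemE : ∀ pv : String × String, pv ∈ e.items ↔ pv.1 ∈ e.keys ∧ pv.2 = e.getD pv.1 "" := by
    intro pv
    constructor
    · intro hp
      refine ⟨PySem.Dict.mem_keys_of_mem_items e hp, ?_⟩
      exact (PySem.Dict.getD_of_mem_items e hp hek "").symm
    · rintro ⟨hk, hv⟩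
      have := PySem.Dict.mem_items_of_get?_eq_some e (getD_val_of_mem_keys e pv.1 hk)
      rwa [← hv] at this
  have hitemA : ∀ pv : String × String, pv ∈ a.items ↔ pv.1 ∈ a.keys ∧ pv.2 = a.getD pv.1 "" := by
    intro pv
    constructor
    · intro hp
      refine ⟨PySem.Dict.mem_keys_of_mem_items a hp, ?_⟩
      exact (PySem.Dict.getD_of_mem_items a hp hak "").symm
    · rintro ⟨hk, hv⟩
      have := PySem.Dict.mem_items_of_get?_eq_some a (getD_val_of_mem_keys a pv.1 hk)
      rwa [← hv] at this
  have hc : PySem.List.sorted ((PySem.Set.inter (PySem.Set.ofList e.keys) (PySem.Set.ofList a.keys)).filter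
      (fun p => decide (e.getD p "" ≠ a.getD p ""))) (fun x => x) false
      = (ei.filter (fun pv => decide (pv.1 ∈ ai.map (fun x => x.1) ∧ pv ∉ ai))).map (fun x => x.1) := by
    apply sorted_eq_of_nodup_mem_iff
    · exact List.Nodup.filter _ (PySem.Set.nodup_inter _ _ (by rw [heset]; exact hek))
    · exact hltE.sublist (List.Sublist.map _ List.filter_sublist)
    · intro p
      simp only [List.mem_map, List.mem_filter, hmemE, hmemA, PySem.Set.mem_inter,
        PySem.Set.mem_ofList, decide_eq_true_eq, hkA]
      constructor
      · rintro ⟨pv, ⟨⟨hpe, hin, hnin⟩, rfl⟩⟩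
        obtain ⟨hk, hv⟩ := (hitemE pv).mp hpe
        refine ⟨⟨hk, hin⟩, ?_⟩
        intro hEq
        exact hnin ((hitemA pv).mpr ⟨hin, by rw [hv]; exact hEq⟩)
      · rintro ⟨⟨hk, hin⟩, hne⟩
        refine ⟨(p, e.getD p ""), ⟨⟨(hitemE (p, e.getD p "")).mpr ⟨hk, rfl⟩, hin, ?_⟩, rfl⟩⟩
        intro hmem
        obtain ⟨_, hv⟩ := (hitemA (p, e.getD p "")).mp hmem
        exact hne hv
  have hm : PySem.List.sorted (PySem.Set.diff (PySem.Set.ofList e.keys) (PySem.Set.ofList a.keys)) (fun x => x) false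
      = (ei.filter (fun pv => decide (pv.1 ∉ ai.map (fun x => x.1)))).map (fun x => x.1) := by
    apply sorted_eq_of_nodup_mem_iff
    · exact PySem.Set.nodup_diff _ _ (by rw [heset]; exact hek)
    · exact hltE.sublist (List.Sublist.map _ List.filter_sublist)
    · intro p
      simp only [List.mem_map, List.mem_filter, hmemE, PySem.Set.mem_diff,
        PySem.Set.mem_ofList, decide_eq_true_eq, hkA]
      constructor
      · rintro ⟨pv, ⟨⟨hpe, hnin⟩, rfl⟩⟩
        exact ⟨((hitemE pv).mp hpe).1, hnin⟩
      · rintro ⟨hk, hnin⟩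
        exact ⟨(p, e.getD p ""), ⟨⟨(hitemE (p, e.getD p "")).mpr ⟨hk, rfl⟩, hnin⟩, rfl⟩⟩
  have hx : PySem.List.sorted (PySem.Set.diff (PySem.Set.ofList a.keys) (PySem.Set.ofList e.keys)) (fun x => x) false
      = (ai.filter (fun qv => decide (qv.1 ∉ ei.map (fun x => x.1)))).map (fun x => x.1) := by
    apply sorted_eq_of_nodup_mem_iff
    · exact PySem.Set.nodup_diff _ _ (by rw [haset]; exact hak)
    · exact hltA.sublist (List.Sublist.map _ List.filter_sublist)
    · intro p
      simp only [List.mem_map, List.mem_filter, hmemA, PySem.Set.mem_diff,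
        PySem.Set.mem_ofList, decide_eq_true_eq, hkE]
      constructor
      · rintro ⟨qv, ⟨⟨hqa, hnin⟩, rfl⟩⟩
        exact ⟨((hitemA qv).mp hqa).1, hnin⟩
      · rintro ⟨hk, hnin⟩
        exact ⟨(p, a.getD p ""), ⟨⟨(hitemA (p, a.getD p "")).mpr ⟨hk, rfl⟩, hnin⟩, rfl⟩⟩
  rw [hc, hm, hx]
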